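-- pv_equiv track=rewrite | github.com/thekidder/adventofcode | 2021/day21/solution.py | get_outcomes
-- ===== SOURCE A (Python) =====
-- from collections import defaultdict, Counter
--
-- def roll_dirac(space):
--     spaces = []
--     scores = [(1, 1, 1), (1, 1, 2), (1, 1, 3), (1, 2, 1), (1, 2, 2), (1, 2, 3), (1, 3, 1), (1, 3, 2), (1, 3, 3), (2, 1, 1), (2, 1, 2), (2, 1, 3), (2, 2, 1), (2, 2, 2), (2, 2, 3), (2, 3, 1), (2, 3, 2), (2, 3, 3), (3, 1, 1), (3, 1, 2), (3, 1, 3), (3, 2, 1), (3, 2, 2), (3, 2, 3), (3, 3, 1), (3, 3, 2), (3, 3, 3)]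
--     for score in scores:
--         final_score = sum(score)
--         s = space + final_score
--         s = ((s - 1) % 10) + 1
--         spaces.append(s)
--     return spaces
--
-- def get_outcomes(game, n):
--     if game[2] >= 21 or game[3] >= 21:
--         c = Counter()
--         c[game] = n
--         return c
--     outcomes = Counter()
--     for space in roll_dirac(game[0]):
--         p1_space = space
--         p1_score = game[2] + space
--         outcomes[(p1_space, game[1], p1_score, game[3])] += n
--
--     p2_outcomes = Counter()
--     for outcome, m in outcomes.items():
--         if outcome[2] >= 21:
--             p2_outcomes[outcome] += m
--         else:
--             for space in roll_dirac(outcome[1]):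
--                 p2_space = space
--                 p2_score = outcome[3] + space
--                 p2_outcomes[(outcome[0], p2_space, outcome[2], p2_score)] += m
--
--     return p2_outcomes
-- ===== SOURCE B (Python) =====
-- from collections import Counter
--
-- # three-roll sum distribution of a Dirac die: sum -> multiplicity
-- DIST = ((3, 1), (4, 3), (5, 6), (6, 7), (7, 6), (8, 3), (9, 1))
--
-- def get_outcomes(game, n):
--     if game[2] >= 21 or game[3] >= 21:
--         c = Counter()
--         c[game] = n
--         return c
--     result = Counter()
--     for s1, f1 in DIST:
--         sp1 = (game[0] + s1 - 1) % 10 + 1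
--         sc1 = game[2] + sp1
--         if sc1 >= 21:
--             result[(sp1, game[1], sc1, game[3])] += f1 * n
--         else:
--             for s2, f2 in DIST:
--                 sp2 = (game[1] + s2 - 1) % 10 + 1
--                 sc2 = game[3] + sp2
--                 result[(sp1, sp2, sc1, sc2)] += f1 * f2 * n
--     return result
-- ===== Notes on version B (the rewrite author's own statement) =====
-- stated objective: faster
-- what changed: Replaces the 27 explicit three-roll dice sequences (enumerated once per player via roll_dirac, plus an intermediate player-1 Counter that is re-traversed) with the precomputed 7-bucket roll-sum frequency distribution {3:1,4:3,5:6,6:7,7:6,8:3,9:1}, expanding both players in a single fused pass that multiplies counts by bucket frequencies.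
import Mathlib
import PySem

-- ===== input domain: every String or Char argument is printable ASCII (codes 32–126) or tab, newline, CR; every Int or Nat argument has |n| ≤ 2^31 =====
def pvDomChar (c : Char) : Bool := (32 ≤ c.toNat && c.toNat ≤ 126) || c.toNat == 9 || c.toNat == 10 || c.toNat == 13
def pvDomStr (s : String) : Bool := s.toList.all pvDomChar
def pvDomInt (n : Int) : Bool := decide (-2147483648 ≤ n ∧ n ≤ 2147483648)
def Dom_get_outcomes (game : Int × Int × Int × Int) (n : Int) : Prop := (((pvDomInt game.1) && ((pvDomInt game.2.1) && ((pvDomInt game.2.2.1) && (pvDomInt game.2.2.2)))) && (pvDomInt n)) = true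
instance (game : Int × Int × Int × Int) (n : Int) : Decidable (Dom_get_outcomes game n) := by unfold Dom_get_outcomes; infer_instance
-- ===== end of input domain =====

-- B replaces A's 27 explicit dice sequences (and A's intermediate player-1 Counter pass) by the
-- precomputed 7-bucket roll-sum frequency distribution, fused into a single pass (objective: faster).

-- ===== PORT A =====
def roll_dirac (space : Int) : List Int :=
  let scores : List (Int × Int × Int) :=
    [(1,1,1),(1,1,2),(1,1,3),(1,2,1),(1,2,2),(1,2,3),(1,3,1),(1,3,2),(1,3,3),
     (2,1,1),(2,1,2),(2,1,3),(2,2,1),(2,2,2),(2,2,3),(2,3,1),(2,3,2),(2,3,3),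
     (3,1,1),(3,1,2),(3,1,3),(3,2,1),(3,2,2),(3,2,3),(3,3,1),(3,3,2),(3,3,3)]
  scores.foldl (fun spaces score =>
    let final_score := score.1 + score.2.1 + score.2.2
    let s := space + final_score
    let s := PySem.Int.mod (s - 1) 10 + 1
    spaces ++ [s]) []

def get_outcomes (game : Int × Int × Int × Int) (n : Int) : List (Int × Int × Int × Int × Int) :=
  if game.2.2.1 ≥ 21 ∨ game.2.2.2 ≥ 21 then
    (((PySem.Dict.empty : PySem.Dict (Int × Int × Int × Int) Int).insert game n).items).map
      (fun p => (p.1.1, p.1.2.1, p.1.2.2.1, p.1.2.2.2, p.2))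
  else
    let outcomes : PySem.Dict (Int × Int × Int × Int) Int :=
      (roll_dirac game.1).foldl (fun d space =>
        d.modify (space, game.2.1, game.2.2.1 + space, game.2.2.2) 0 (· + n)) PySem.Dict.empty
    let p2_outcomes : PySem.Dict (Int × Int × Int × Int) Int :=
      outcomes.items.foldl (fun d om =>
        if om.1.2.2.1 ≥ 21 then d.modify om.1 0 (· + om.2)
        else (roll_dirac om.1.2.1).foldl (fun d space =>
          d.modify (om.1.1, space, om.1.2.2.1, om.1.2.2.2 + space) 0 (· + om.2)) d) PySem.Dict.empty
    p2_outcomes.items.map (fun p => (p.1.1, p.1.2.1, p.1.2.2.1, p.1.2.2.2, p.2))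

-- ===== PORT B =====
-- B's module constant DIST: the three-roll sum distribution of a Dirac die
def pv_dist : List (Int × Int) := [(3,1),(4,3),(5,6),(6,7),(7,6),(8,3),(9,1)]

def get_outcomes_alt (game : Int × Int × Int × Int) (n : Int) : List (Int × Int × Int × Int × Int) :=
  if game.2.2.1 ≥ 21 ∨ game.2.2.2 ≥ 21 then
    (((PySem.Dict.empty : PySem.Dict (Int × Int × Int × Int) Int).insert game n).items).map
      (fun p => (p.1.1, p.1.2.1, p.1.2.2.1, p.1.2.2.2, p.2))
  else
    let result : PySem.Dict (Int × Int × Int × Int) Int :=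
      pv_dist.foldl (fun d p1 =>
        let sp1 := PySem.Int.mod (game.1 + p1.1 - 1) 10 + 1
        let sc1 := game.2.2.1 + sp1
        if sc1 ≥ 21 then d.modify (sp1, game.2.1, sc1, game.2.2.2) 0 (· + p1.2 * n)
        else pv_dist.foldl (fun d p2 =>
          let sp2 := PySem.Int.mod (game.2.1 + p2.1 - 1) 10 + 1
          let sc2 := game.2.2.2 + sp2
          d.modify (sp1, sp2, sc1, sc2) 0 (· + p1.2 * p2.2 * n)) d) PySem.Dict.empty
    result.items.map (fun p => (p.1.1, p.1.2.1, p.1.2.2.1, p.1.2.2.2, p.2))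

-- ===== PRECONDITION & SPEC =====
def Spec_get_outcomes (game : Int × Int × Int × Int) (n : Int) (out : List (Int × Int × Int × Int × Int)) : Prop := out = get_outcomes_alt game n
instance (game : Int × Int × Int × Int) (n : Int) (out : List (Int × Int × Int × Int × Int)) : Decidable (Spec_get_outcomes game n out) := by unfold Spec_get_outcomes; infer_instance

-- ===== CLAIM (what is proved, stated in full; the proofs are below) =====
def Claim_equal_get_outcomes : Prop := ∀ (game : Int × Int × Int × Int) (n : Int), Dom_get_outcomes game n → Spec_get_outcomes game n (get_outcomes game n)


-- ===== LEMMAS AND PROOFS =====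
abbrev pvKey := Int × Int × Int × Int

-- player-landing space after a three-roll sum s from square `base`
def pvSp (base s : Int) : Int := PySem.Int.mod (base + s - 1) 10 + 1
-- the 27 three-roll sums in A's sequence order
def pvS27 : List Int := [3,4,5,4,5,6,5,6,7,4,5,6,5,6,7,6,7,8,5,6,7,6,7,8,7,8,9]
def pvSums : List Int := [3,4,5,6,7,8,9]
def pvCnt (s : Int) : Int := (pvS27.count s : Int)

lemma pvSp_ne (base x y : Int) (hx3 : 3 ≤ x) (hx9 : x ≤ 9) (hy3 : 3 ≤ y) (hy9 : y ≤ 9)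
    (hxy : x ≠ y) : pvSp base x ≠ pvSp base y := by
  unfold pvSp
  simp only [PySem.Int.mod_eq_emod_of_pos (by norm_num : (0:Int) < 10)]
  omega

lemma pvRoll_eq (base : Int) : roll_dirac base = pvS27.map (pvSp base) := by
  unfold roll_dirac pvS27 pvSp
  norm_num [List.foldl]

lemma pvGetD_bumps (k : Int → pvKey) (m : Int) :
    ∀ (xs : List Int) (d : PySem.Dict pvKey Int) (t : pvKey),
      (xs.foldl (fun d x => d.insert (k x) (d.getD (k x) 0 + m)) d).getD t 0
        = d.getD t 0 + (xs.countP (fun x => k x == t) : Int) * m := by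
  intro xs
  induction xs with
  | nil => intro d t; simp
  | cons x rest ih =>
    intro d t
    simp only [List.foldl_cons, ih, List.countP_cons]
    rw [PySem.Dict.getD_insert]
    by_cases h : t = k x
    · simp [h]; ring
    · have : (k x == t) = false := by simp; exact fun e => h e.symm
      simp [h, this]

lemma pvOfList_map_inj (k : Int → pvKey) :
    ∀ (xs : List Int), (∀ x ∈ xs, ∀ y ∈ xs, k x = k y → x = y) →
      PySem.Set.ofList (xs.map k) = (PySem.Set.ofList xs).map k := by
  intro xs
  induction xs with
  | nil => intro _; simp [PySem.Set.ofList_nil]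
  | cons x rest ih =>
    intro hinj
    rw [List.map_cons, PySem.Set.ofList_cons, PySem.Set.ofList_cons,
      ih (fun u hu v hv => hinj u (by simp [hu]) v (by simp [hv]))]
    unfold PySem.Set.discard
    rw [List.filter_map]
    have hp : ∀ y ∈ PySem.Set.ofList rest,
        ((fun y => !y == k x) ∘ k) y = (fun y => !y == x) y := by
      intro y hy
      have hyrest : y ∈ rest := (PySem.Set.mem_ofList rest y).mp hy
      simp only [Function.comp]
      by_cases h : y = x
      · simp [h]
      · have : ¬ (k y = k x) := fun e => h (hinj y (by simp [hyrest]) x (by simp) e)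
        simp [h, this]
    rw [List.filter_congr hp, List.map_cons]

lemma pvItems_bumps_const (k : Int → pvKey) (m : Int) (xs : List Int)
    (d : PySem.Dict pvKey Int) (hnd : d.keys.Nodup)
    (hinj : ∀ x ∈ xs, ∀ y ∈ xs, k x = k y → x = y)
    (hfresh : ∀ x ∈ xs, d.contains (k x) = false) :
    (xs.foldl (fun d x => d.insert (k x) (d.getD (k x) 0 + m)) d).items
      = d.items ++ (PySem.Set.ofList xs).map (fun x => (k x, (xs.count x : Int) * m)) := by
  have hnd' := PySem.Dict.nodup_keys_foldl_insert_key xs k (fun d x => d.getD (k x) 0 + m) d hnd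
  have hkeys := PySem.Dict.keys_foldl_insert_key xs k (fun d x => d.getD (k x) 0 + m) d
  rw [PySem.Dict.items_eq_map_keys _ hnd' 0, hkeys, PySem.Set.update_eq_append_filter]
  have hnotmem : ∀ x ∈ xs, k x ∉ d.keys := by
    intro x hx
    have := hfresh x hx
    rw [PySem.Dict.contains_eq_decide_mem_keys] at this
    simpa using this
  have hfilter : List.filter (fun y => !(PySem.Set.contains d.keys y)) (PySem.Set.ofList (xs.map k))
      = PySem.Set.ofList (xs.map k) := by
    apply List.filter_eq_self.mpr
    intro y hy
    have hym : y ∈ xs.map k := (PySem.Set.mem_ofList _ _).mp hy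
    obtain ⟨x, hx, rfl⟩ := List.mem_map.mp hym
    simpa using hnotmem x hx
  rw [hfilter, pvOfList_map_inj k xs hinj, List.map_append, List.map_map]
  congr 1
  · rw [PySem.Dict.items_eq_map_keys d hnd 0]
    apply List.map_congr_left
    intro t ht
    rw [pvGetD_bumps]
    have hcz : xs.countP (fun x => k x == t) = 0 := by
      apply List.countP_eq_zero.mpr
      intro x hx
      have : k x ≠ t := fun e => hnotmem x hx (e ▸ ht)
      simpa using this
    simp [hcz]
  · apply List.map_congr_left
    intro x hx
    have hxs : x ∈ xs := (PySem.Set.mem_ofList _ _).mp hx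
    simp only [Function.comp]
    rw [pvGetD_bumps, PySem.Dict.getD_of_not_contains d 0 (hfresh x hxs)]
    have hcc : xs.countP (fun y => k y == k x) = xs.count x := by
      rw [List.count_eq_countP]
      apply List.countP_congr
      intro y hy
      constructor
      · intro h; have : k y = k x := by simpa using h
        simpa using hinj y hy x hxs this
      · intro h; have : y = x := by simpa using h
        simp [this]
    rw [hcc]
    simp

lemma pvItems_bumps_fresh {β : Type} (k : β → pvKey) (w : β → Int) :
    ∀ (l : List β) (d : PySem.Dict pvKey Int), d.keys.Nodup →
      (∀ x ∈ l, d.contains (k x) = false) → (l.map k).Nodup →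
      (l.foldl (fun d x => d.insert (k x) (d.getD (k x) 0 + w x)) d).items
        = d.items ++ l.map (fun x => (k x, w x)) := by
  intro l
  induction l with
  | nil => intro d _ _ _; simp
  | cons x rest ih =>
    intro d hnd hfresh hkn
    have hfx : d.contains (k x) = false := hfresh x (by simp)
    have hd0 : d.getD (k x) 0 = 0 := PySem.Dict.getD_of_not_contains d 0 hfx
    simp only [List.foldl_cons, hd0, zero_add]
    rw [ih (d.insert (k x) (w x))]
    · rw [PySem.Dict.items_insert_of_not_contains d (w x) hfx]; simp
    · rw [PySem.Dict.keys_insert_of_not_contains d (w x) hfx]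
      refine List.Nodup.append hnd (by simp) ?_
      intro t ht hts; simp at hts; subst hts
      rw [PySem.Dict.contains_eq_decide_mem_keys] at hfx; simp at hfx; exact hfx ht
    · intro y hy
      rw [PySem.Dict.contains_eq_decide_mem_keys,
        PySem.Dict.keys_insert_of_not_contains d (w x) hfx]
      have h1 : k y ≠ k x := by
        simp at hkn; intro e; exact hkn.1 y hy e
      have h2 : k y ∉ d.keys := by
        have := hfresh y (by simp [hy])
        rw [PySem.Dict.contains_eq_decide_mem_keys] at this; simpa using this
      simp [h1, h2]
    · simp at hkn; exact hkn.2


-- A's phase-2 body, specialised to the phase-1 item of roll-sum bucket s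
def pvStepA (p q a b n : Int) (d : PySem.Dict pvKey Int) (s : Int) : PySem.Dict pvKey Int :=
  if a + pvSp p s ≥ 21 then d.modify (pvSp p s, q, a + pvSp p s, b) 0 (· + pvCnt s * n)
  else (roll_dirac q).foldl
    (fun d space => d.modify (pvSp p s, space, a + pvSp p s, b + space) 0 (· + pvCnt s * n)) d

-- B's outer-loop body, specialised to the distribution entry (s, pvCnt s)
def pvStepB (p q a b n : Int) (d : PySem.Dict pvKey Int) (s : Int) : PySem.Dict pvKey Int :=
  if a + pvSp p s ≥ 21 then d.modify (pvSp p s, q, a + pvSp p s, b) 0 (· + pvCnt s * n)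
  else pv_dist.foldl
    (fun d p2 => d.modify (pvSp p s, pvSp q p2.1, a + pvSp p s, b + pvSp q p2.1) 0
      (· + pvCnt s * p2.2 * n)) d

lemma pvS27_bounds : ∀ x ∈ pvS27, 3 ≤ x ∧ x ≤ 9 := by decide

lemma pvSums_sub : ∀ x ∈ pvSums, x ∈ pvS27 := by decide

lemma pvInj2 (p q a b s : Int) :
    ∀ x ∈ pvS27, ∀ y ∈ pvS27,
      (fun s2 => ((pvSp p s, pvSp q s2, a + pvSp p s, b + pvSp q s2) : pvKey)) x
        = (fun s2 => ((pvSp p s, pvSp q s2, a + pvSp p s, b + pvSp q s2) : pvKey)) y → x = y := by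
  intro x hx y hy he
  obtain ⟨hx3, hx9⟩ := pvS27_bounds x hx
  obtain ⟨hy3, hy9⟩ := pvS27_bounds y hy
  by_contra hne
  exact pvSp_ne q x y hx3 hx9 hy3 hy9 hne (congrArg (fun t : pvKey => t.2.1) he)

lemma pvFresh2 (p q a b s : Int) (d : PySem.Dict pvKey Int)
    (hf : ∀ kk ∈ d.keys, kk.1 ≠ pvSp p s) :
    ∀ x : Int, d.contains ((pvSp p s, pvSp q x, a + pvSp p s, b + pvSp q x) : pvKey) = false := by
  intro x
  rw [PySem.Dict.contains_eq_decide_mem_keys]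
  simp only [decide_eq_false_iff_not]
  intro hmem
  exact hf _ hmem rfl

lemma pvDist_eq : pv_dist = pvSums.map (fun s => (s, pvCnt s)) := by decide

lemma pvOfList_S27 : PySem.Set.ofList pvS27 = pvSums := by decide

lemma pvBucket (p q a b n s : Int)
    (d : PySem.Dict pvKey Int) (hnd : d.keys.Nodup)
    (hf : ∀ kk ∈ d.keys, kk.1 ≠ pvSp p s) :
    pvStepA p q a b n d s = pvStepB p q a b n d s := by
  unfold pvStepA pvStepB
  by_cases hw : a + pvSp p s ≥ 21
  · simp [hw]
  · simp only [if_neg hw]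
    apply PySem.Dict.ext
    rw [pvRoll_eq q, List.foldl_map, pvDist_eq, List.foldl_map]
    simp only [PySem.Dict.modify]
    rw [pvItems_bumps_const
        (fun s2 => ((pvSp p s, pvSp q s2, a + pvSp p s, b + pvSp q s2) : pvKey))
        (pvCnt s * n) pvS27 d hnd (pvInj2 p q a b s)
        (fun x _ => pvFresh2 p q a b s d hf x)]
    rw [pvItems_bumps_fresh
        (fun s2 => ((pvSp p s, pvSp q s2, a + pvSp p s, b + pvSp q s2) : pvKey))
        (fun s2 => pvCnt s * pvCnt s2 * n) pvSums d hnd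
        (fun x _ => pvFresh2 p q a b s d hf x)
        (List.Nodup.map_on
          (fun x hx y hy he => pvInj2 p q a b s x (pvSums_sub x hx) y (pvSums_sub y hy) he)
          (by decide))]
    rw [pvOfList_S27]
    congr 1
    apply List.map_congr_left
    intro s2 _
    refine Prod.ext rfl ?_
    show (pvS27.count s2 : Int) * (pvCnt s * n) = pvCnt s * pvCnt s2 * n
    unfold pvCnt
    ring

set_option maxHeartbeats 1000000 in
lemma pvStepB_keys (p q a b n s : Int)
    (d : PySem.Dict pvKey Int) (hnd : d.keys.Nodup)
    (hf : ∀ kk ∈ d.keys, kk.1 ≠ pvSp p s) :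
    (pvStepB p q a b n d s).keys.Nodup ∧
      ∀ kk ∈ (pvStepB p q a b n d s).keys, kk ∈ d.keys ∨ kk.1 = pvSp p s := by
  unfold pvStepB
  by_cases hw : a + pvSp p s ≥ 21
  · simp only [if_pos hw, PySem.Dict.modify]
    have hfr : d.contains ((pvSp p s, q, a + pvSp p s, b) : pvKey) = false := by
      rw [PySem.Dict.contains_eq_decide_mem_keys]
      simp only [decide_eq_false_iff_not]
      intro hmem
      exact hf _ hmem rfl
    rw [PySem.Dict.keys_insert_of_not_contains d _ hfr]
    constructor
    · refine List.Nodup.append hnd (by simp) ?_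
      intro t ht hts; simp at hts; subst hts
      rw [PySem.Dict.contains_eq_decide_mem_keys] at hfr; simp at hfr; exact hfr ht
    · intro kk hkk
      rcases List.mem_append.mp hkk with h | h
      · exact Or.inl h
      · simp at h; subst h; exact Or.inr rfl
  · simp only [if_neg hw, PySem.Dict.modify, pvDist_eq, List.foldl_map]
    constructor
    · exact PySem.Dict.nodup_keys_foldl_insert_key pvSums
        (fun s2 => ((pvSp p s, pvSp q s2, a + pvSp p s, b + pvSp q s2) : pvKey))
        (fun d s2 => d.getD ((pvSp p s, pvSp q s2, a + pvSp p s, b + pvSp q s2) : pvKey) 0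
          + pvCnt s * pvCnt s2 * n) d hnd
    · intro kk hkk
      rw [PySem.Dict.keys_foldl_insert_key pvSums
        (fun s2 => ((pvSp p s, pvSp q s2, a + pvSp p s, b + pvSp q s2) : pvKey))
        (fun d s2 => d.getD ((pvSp p s, pvSp q s2, a + pvSp p s, b + pvSp q s2) : pvKey) 0
          + pvCnt s * pvCnt s2 * n) d] at hkk
      rcases (PySem.Set.mem_update _ _ _).mp hkk with h | h
      · exact Or.inl h
      · obtain ⟨x, _, rfl⟩ := List.mem_map.mp h
        exact Or.inr rfl

lemma pvChain (p q a b n : Int) :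
    ∀ (ss : List Int) (d : PySem.Dict pvKey Int), ss.Nodup →
      (∀ s ∈ ss, 3 ≤ s ∧ s ≤ 9) → d.keys.Nodup →
      (∀ s ∈ ss, ∀ kk ∈ d.keys, kk.1 ≠ pvSp p s) →
      ss.foldl (pvStepA p q a b n) d = ss.foldl (pvStepB p q a b n) d := by
  intro ss
  induction ss with
  | nil => intro d _ _ _ _; rw [List.foldl_nil, List.foldl_nil]
  | cons s rest ih =>
    intro d hssnd hbnd hnd hf
    obtain ⟨hs3, hs9⟩ := hbnd s (by simp)
    rw [List.foldl_cons, List.foldl_cons,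
      pvBucket p q a b n s d hnd (hf s (by simp))]
    obtain ⟨hnd', hmem'⟩ := pvStepB_keys p q a b n s d hnd (hf s (by simp))
    refine ih (pvStepB p q a b n d s) (by simp at hssnd; exact hssnd.2)
      (fun s' hs' => hbnd s' (by simp [hs'])) hnd' ?_
    intro s' hs' kk hkk
    rcases hmem' kk hkk with h | h
    · exact hf s' (by simp [hs']) kk h
    · rw [h]
      obtain ⟨h3', h9'⟩ := hbnd s' (by simp [hs'])
      have hne : s ≠ s' := by
        simp at hssnd; intro e; exact hssnd.1 (e ▸ hs')
      exact pvSp_ne p s s' hs3 hs9 h3' h9' hne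

lemma pvInj1 (p q a b : Int) :
    ∀ x ∈ pvS27, ∀ y ∈ pvS27,
      (fun s => ((pvSp p s, q, a + pvSp p s, b) : pvKey)) x
        = (fun s => ((pvSp p s, q, a + pvSp p s, b) : pvKey)) y → x = y := by
  intro x hx y hy he
  obtain ⟨hx3, hx9⟩ := pvS27_bounds x hx
  obtain ⟨hy3, hy9⟩ := pvS27_bounds y hy
  by_contra hne
  exact pvSp_ne p x y hx3 hx9 hy3 hy9 hne (congrArg (fun t : pvKey => t.1) he)

lemma pvPhase1 (p q a b n : Int) :
    ((roll_dirac p).foldl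
        (fun d space => d.modify ((space, q, a + space, b) : pvKey) 0 (· + n))
        (PySem.Dict.empty : PySem.Dict pvKey Int)).items
      = pvSums.map (fun s => (((pvSp p s, q, a + pvSp p s, b) : pvKey), pvCnt s * n)) := by
  rw [pvRoll_eq p, List.foldl_map]
  simp only [PySem.Dict.modify]
  rw [pvItems_bumps_const (fun s => ((pvSp p s, q, a + pvSp p s, b) : pvKey)) n pvS27
      PySem.Dict.empty (by simp) (pvInj1 p q a b) (by intro x _; simp)]
  rw [pvOfList_S27]
  have hempty : (PySem.Dict.empty : PySem.Dict pvKey Int).items = [] := rfl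
  rw [hempty, List.nil_append]
  apply List.map_congr_left
  intro s _
  rfl

-- ===== VERDICT (by name: the statement is the Claim_ definition above) =====
theorem get_outcomes_spec : Claim_equal_get_outcomes := by
  intro game n _
  obtain ⟨p, q, a, b⟩ := game
  unfold Spec_get_outcomes get_outcomes get_outcomes_alt
  by_cases hg : a ≥ 21 ∨ b ≥ 21
  · rw [if_pos hg, if_pos hg]
  · simp only [if_neg hg]
    have hA : (fun (d : PySem.Dict pvKey Int) (s : Int) =>
        (fun (d : PySem.Dict pvKey Int) (om : pvKey × Int) =>
          if om.1.2.2.1 ≥ 21 then d.modify om.1 0 fun x => x + om.2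
          else
            List.foldl (fun d space => d.modify (om.1.1, space, om.1.2.2.1, om.1.2.2.2 + space) 0 fun x => x + om.2) d
              (roll_dirac om.1.2.1)) d (((pvSp p s, q, a + pvSp p s, b) : pvKey), pvCnt s * n))
        = pvStepA p q a b n := by funext d s; rfl
    rw [pvPhase1 p q a b n, List.foldl_map, hA]
    have hkey : List.foldl (pvStepA p q a b n) (PySem.Dict.empty : PySem.Dict pvKey Int) pvSums
        = List.foldl
            (fun (d : PySem.Dict pvKey Int) (p1 : Int × Int) =>
              if a + (PySem.Int.mod (p + p1.1 - 1) 10 + 1) ≥ 21 then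
                d.modify (PySem.Int.mod (p + p1.1 - 1) 10 + 1, q, a + (PySem.Int.mod (p + p1.1 - 1) 10 + 1), b) 0
                  fun x => x + p1.2 * n
              else
                List.foldl
                  (fun d p2 =>
                    d.modify
                      (PySem.Int.mod (p + p1.1 - 1) 10 + 1, PySem.Int.mod (q + p2.1 - 1) 10 + 1,
                        a + (PySem.Int.mod (p + p1.1 - 1) 10 + 1), b + (PySem.Int.mod (q + p2.1 - 1) 10 + 1))
                      0 fun x => x + p1.2 * p2.2 * n)
                  d pv_dist)
            (PySem.Dict.empty : PySem.Dict pvKey Int) pv_dist := by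
      rw [pvDist_eq, List.foldl_map]
      have hB : (fun (d : PySem.Dict pvKey Int) (s : Int) =>
          if a + (PySem.Int.mod (p + (s, pvCnt s).1 - 1) 10 + 1) ≥ 21 then
            d.modify
              (PySem.Int.mod (p + (s, pvCnt s).1 - 1) 10 + 1, q,
                a + (PySem.Int.mod (p + (s, pvCnt s).1 - 1) 10 + 1), b)
              0 fun x => x + (s, pvCnt s).2 * n
          else
            List.foldl
              (fun d p2 =>
                d.modify
                  (PySem.Int.mod (p + (s, pvCnt s).1 - 1) 10 + 1, PySem.Int.mod (q + p2.1 - 1) 10 + 1,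
                    a + (PySem.Int.mod (p + (s, pvCnt s).1 - 1) 10 + 1), b + (PySem.Int.mod (q + p2.1 - 1) 10 + 1))
                  0 fun x => x + (s, pvCnt s).2 * p2.2 * n)
              d (List.map (fun s => (s, pvCnt s)) pvSums))
          = pvStepB p q a b n := by funext d s; rfl
      rw [hB]
      exact pvChain p q a b n pvSums PySem.Dict.empty (by decide) (by decide)
        (by simp) (by intro s _ kk hkk; simp at hkk)
    rw [hkey]
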